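-- pv_equiv track=rewrite | github.com/TonyBSosa/NormalizacionAutomatizada | validators.py | _collect_table_columns
-- ===== SOURCE A (Python) =====
-- def _collect_table_columns(rows):
--     """
--     Construye dict: {tabla_lower: set(col_lower, ...)} a partir del CSV.
--     """
--     mapping = {}
--     for r in rows:
--         t = (r.get("tabla","") or "").strip()
--         a = (r.get("atributo","") or "").strip()
--         if not t or not a:
--             continue
--         key = t.lower()
--         mapping.setdefault(key, set()).add(a.lower())
--     return mapping
-- ===== SOURCE B (Python) =====
-- def _collect_table_columns(rows):
--     """
--     Construye dict: {tabla_lower: set(col_lower, ...)} a partir del CSV.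
--     """
--     pairs = [(t.lower(), a.lower())
--              for t, a in (((r.get("tabla", "") or "").strip(),
--                            (r.get("atributo", "") or "").strip()) for r in rows)
--              if t and a]
--     return {t: {a for t2, a in pairs if t2 == t} for t, _ in pairs}
-- ===== Notes on version B (the rewrite author's own statement) =====
-- stated objective: alternative
-- what changed: Replaces the incremental setdefault-dict accumulation with a two-phase declarative form: first a flat list of normalized (table, attribute) pairs, then a dict comprehension that groups each table's attributes with a set comprehension over the pair list.
import Mathlib
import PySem

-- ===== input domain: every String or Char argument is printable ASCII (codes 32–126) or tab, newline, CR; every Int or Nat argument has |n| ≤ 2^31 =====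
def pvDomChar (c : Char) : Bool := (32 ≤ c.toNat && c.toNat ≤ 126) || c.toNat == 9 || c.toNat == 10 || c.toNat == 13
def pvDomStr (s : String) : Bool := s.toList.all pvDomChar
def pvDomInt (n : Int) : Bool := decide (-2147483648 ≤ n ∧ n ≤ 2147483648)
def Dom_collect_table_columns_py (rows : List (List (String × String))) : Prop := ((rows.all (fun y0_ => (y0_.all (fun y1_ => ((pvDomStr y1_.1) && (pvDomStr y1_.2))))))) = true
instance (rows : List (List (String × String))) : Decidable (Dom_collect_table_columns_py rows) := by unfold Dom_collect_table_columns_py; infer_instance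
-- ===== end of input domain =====

-- B replaces A's incremental setdefault accumulation by a flat normalized pair list followed by a
-- grouping dict comprehension (alternative decomposition, not faster).
-- NOTE: Python's `s or ""` on a string s is the identity (it returns "" exactly when s == ""), so
-- both ports read the dict value directly.

-- ===== PORT A =====
def collect_table_columns_py (rows : List (List (String × String))) : List (String × List String) :=
  (rows.foldl
    (fun (mapping : PySem.Dict String (PySem.Set String)) r =>
      let t := PySem.Str.strip ((PySem.Dict.mk r).getD "tabla" "")
      let a := PySem.Str.strip ((PySem.Dict.mk r).getD "atributo" "")
      if t = "" ∨ a = "" then mapping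
      else
        let key := PySem.Str.lower t
        -- mapping.setdefault(key, set()).add(a.lower())  ==  mapping[key] = mapping.get(key, set()) ∪ {a.lower()}
        mapping.modify key PySem.Set.empty (fun s => s.add (PySem.Str.lower a)))
    PySem.Dict.empty).items

-- ===== PORT B =====
def collect_table_columns_py_alt (rows : List (List (String × String))) : List (String × List String) :=
  let pairs := rows.foldl
    (fun (acc : List (String × String)) r =>
      let t := PySem.Str.strip ((PySem.Dict.mk r).getD "tabla" "")
      let a := PySem.Str.strip ((PySem.Dict.mk r).getD "atributo" "")
      if t ≠ "" ∧ a ≠ "" then acc ++ [(PySem.Str.lower t, PySem.Str.lower a)] else acc)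
    []
  (pairs.foldl
    (fun (d : PySem.Dict String (PySem.Set String)) p =>
      d.insert p.1 (PySem.Set.ofList ((pairs.filter (fun q => q.1 == p.1)).map (·.2))))
    PySem.Dict.empty).items

-- ===== PRECONDITION & SPEC =====
def Spec_collect_table_columns_py (rows : List (List (String × String))) (out : List (String × List String)) : Prop := out = collect_table_columns_py_alt rows
instance (rows : List (List (String × String))) (out : List (String × List String)) : Decidable (Spec_collect_table_columns_py rows out) := by unfold Spec_collect_table_columns_py; infer_instance

-- ===== CLAIM (what is proved, stated in full; the proofs are below) =====
def Claim_equal_collect_table_columns_py : Prop := ∀ (rows : List (List (String × String))), Dom_collect_table_columns_py rows → Spec_collect_table_columns_py rows (collect_table_columns_py rows)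

-- ===== LEMMAS AND PROOFS =====

/-- The normalized (table, attribute) contribution of a single row: one pair, or nothing. -/
def pvPair1 (r : List (String × String)) : List (String × String) :=
  let t := PySem.Str.strip ((PySem.Dict.mk r).getD "tabla" "")
  let a := PySem.Str.strip ((PySem.Dict.mk r).getD "atributo" "")
  if t ≠ "" ∧ a ≠ "" then [(PySem.Str.lower t, PySem.Str.lower a)] else []

def pvPairs (rows : List (List (String × String))) : List (String × String) :=
  rows.flatMap pvPair1

lemma pvPairs_fold (rows : List (List (String × String))) (acc : List (String × String)) :
    rows.foldl
      (fun (acc : List (String × String)) r =>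
        let t := PySem.Str.strip ((PySem.Dict.mk r).getD "tabla" "")
        let a := PySem.Str.strip ((PySem.Dict.mk r).getD "atributo" "")
        if t ≠ "" ∧ a ≠ "" then acc ++ [(PySem.Str.lower t, PySem.Str.lower a)] else acc)
      acc = acc ++ pvPairs rows := by
  induction rows generalizing acc with
  | nil => simp [pvPairs]
  | cons r rows ih =>
      simp only [List.foldl_cons, pvPairs, List.flatMap_cons]
      rw [ih]
      by_cases h : PySem.Str.strip ((PySem.Dict.mk r).getD "tabla" "") ≠ "" ∧
          PySem.Str.strip ((PySem.Dict.mk r).getD "atributo" "") ≠ ""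
      · simp [pvPair1, h, pvPairs, List.append_assoc]
      · simp [pvPair1, h, pvPairs]

/-- A's row loop is the pair loop over the normalized pairs. -/
lemma pvAfold (rows : List (List (String × String))) (d : PySem.Dict String (PySem.Set String)) :
    rows.foldl
      (fun (mapping : PySem.Dict String (PySem.Set String)) r =>
        let t := PySem.Str.strip ((PySem.Dict.mk r).getD "tabla" "")
        let a := PySem.Str.strip ((PySem.Dict.mk r).getD "atributo" "")
        if t = "" ∨ a = "" then mapping
        else
          let key := PySem.Str.lower t
          mapping.modify key PySem.Set.empty (fun s => s.add (PySem.Str.lower a)))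
      d
    = (pvPairs rows).foldl
        (fun d p => d.modify p.1 PySem.Set.empty (fun s => s.add p.2)) d := by
  induction rows generalizing d with
  | nil => simp [pvPairs]
  | cons r rows ih =>
      simp only [List.foldl_cons, pvPairs, List.flatMap_cons, List.foldl_append]
      rw [ih]
      by_cases h : PySem.Str.strip ((PySem.Dict.mk r).getD "tabla" "") = "" ∨
          PySem.Str.strip ((PySem.Dict.mk r).getD "atributo" "") = ""
      · have h' : ¬ (PySem.Str.strip ((PySem.Dict.mk r).getD "tabla" "") ≠ "" ∧
            PySem.Str.strip ((PySem.Dict.mk r).getD "atributo" "") ≠ "") := by tauto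
        rw [if_pos h]
        simp [pvPair1, h', pvPairs]
      · have h' : PySem.Str.strip ((PySem.Dict.mk r).getD "tabla" "") ≠ "" ∧
            PySem.Str.strip ((PySem.Dict.mk r).getD "atributo" "") ≠ "" := by tauto
        simp [pvPair1, h', pvPairs]

/-- Value accumulated by A's pair loop at a key. -/
lemma pvA_getD (ps : List (String × String)) (d : PySem.Dict String (PySem.Set String)) (k : String) :
    (ps.foldl (fun d p => d.modify p.1 PySem.Set.empty (fun s => s.add p.2)) d).getD k PySem.Set.empty
    = PySem.Set.update (d.getD k PySem.Set.empty) ((ps.filter (fun p => p.1 == k)).map (·.2)) := by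
  induction ps generalizing d with
  | nil => simp [PySem.Set.update]
  | cons p ps ih =>
      simp only [List.foldl_cons]
      rw [ih]
      by_cases h : p.1 = k
      · subst h
        simp [PySem.Set.update_cons]
      · simp [PySem.Dict.getD_modify, h, Ne.symm h]

/-- Value of B's constant-valued insert loop at a key. -/
lemma pvB_getD (ps : List (String × String)) (F : String → PySem.Set String)
    (d : PySem.Dict String (PySem.Set String)) (k : String) :
    (ps.foldl (fun d p => d.insert p.1 (F p.1)) d).getD k PySem.Set.empty
    = if k ∈ ps.map (·.1) then F k else d.getD k PySem.Set.empty := by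
  induction ps generalizing d with
  | nil => simp
  | cons p ps ih =>
      simp only [List.foldl_cons]
      rw [ih]
      by_cases hm : k ∈ ps.map (·.1)
      · simp [hm]
      · by_cases h : k = p.1
        · subst h
          simp [hm]
        · simp [hm, h, PySem.Dict.getD_insert]

-- ===== VERDICT (by name: the statement is the Claim_ definition above) =====
theorem collect_table_columns_py_spec : Claim_equal_collect_table_columns_py := by
  intro rows _
  unfold Spec_collect_table_columns_py collect_table_columns_py collect_table_columns_py_alt
  rw [pvPairs_fold rows []]
  simp only [List.nil_append]
  rw [pvAfold rows PySem.Dict.empty]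
  set ps := pvPairs rows with hps
  set F : String → PySem.Set String :=
    fun k => PySem.Set.ofList ((ps.filter (fun q => q.1 == k)).map (·.2)) with hF
  have hA := fun k => pvA_getD ps PySem.Dict.empty k
  have hB := fun k => pvB_getD ps F PySem.Dict.empty k
  -- keys of both folds
  have hkA : (ps.foldl (fun d p => d.modify p.1 PySem.Set.empty (fun s => s.add p.2))
      PySem.Dict.empty).keys = PySem.Set.ofList (ps.map (·.1)) := by
    rw [PySem.Dict.keys_foldl_modify_key]
    simp [PySem.Set.update_nil_left]
  have hkB : (ps.foldl (fun d p => d.insert p.1 (F p.1)) PySem.Dict.empty).keys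
      = PySem.Set.ofList (ps.map (·.1)) := by
    rw [PySem.Dict.keys_foldl_insert_key]
    simp [PySem.Set.update_nil_left]
  have hndA : (ps.foldl (fun d p => d.modify p.1 PySem.Set.empty (fun s => s.add p.2))
      PySem.Dict.empty).keys.Nodup := by
    rw [hkA]; exact PySem.Set.nodup_ofList _
  have hndB : (ps.foldl (fun d p => d.insert p.1 (F p.1)) PySem.Dict.empty).keys.Nodup := by
    rw [hkB]; exact PySem.Set.nodup_ofList _
  rw [PySem.Dict.items_eq_map_keys _ hndA PySem.Set.empty,
      PySem.Dict.items_eq_map_keys _ hndB PySem.Set.empty, hkA, hkB]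
  apply List.map_congr_left
  intro k hk
  have hmem : k ∈ ps.map (·.1) := (PySem.Set.mem_ofList _ _).mp hk
  rw [hA k, hB k]
  simp [hmem, hF, PySem.Set.update_nil_left, PySem.Set.empty, PySem.Dict.getD_empty]
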